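-- pv_equiv track=rewrite | github.com/packetmaven/bean_vulnerable | src/core/integrated_gnn_framework.py | _select_primary_vulnerability_by_severity
-- ===== SOURCE A (Python) =====
-- from typing import Dict, List, Any, Optional, Tuple, Union
--
-- def _select_primary_vulnerability_by_severity(vulnerabilities: List[str], source_code: str) -> str:
--     """Select primary vulnerability based on severity"""
--     if not vulnerabilities:
--         return 'none'
--
--     severity_order = {
--         'null_pointer_dereference': 100,
--         'buffer_overflow': 95,
--         'integer_overflow': 92,  # CWE-190, CWE-191 - High severity
--         'sql_injection': 90,
--         'command_injection': 90,
--         'deserialization': 85,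
--         'xxe': 85,
--         'ssrf': 84,
--         'el_injection': 83,  # CWE-94 - High severity (code execution via EL evaluation)
--         'http_response_splitting': 82,  # CWE-113 - High severity (can lead to XSS, cache poisoning)
--         'reflection_injection': 80,  # CWE-470 - High severity (arbitrary method invocation)
--         'session_fixation': 78,  # CWE-384 - High severity (authentication bypass)
--         'resource_leak': 76,  # CWE-404, CWE-772 - High severity (memory exhaustion, DOS)
--         'ldap_injection': 75,
--         'xpath_injection': 74,
--         'race_condition': 72,  # CWE-362, CWE-366, CWE-367 - High severity (data corruption, TOCTOU)
--         'xss': 70,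
--         'path_traversal': 70,
--         'weak_crypto': 60,
--         'insecure_randomness': 55,
--         'hardcoded_credentials': 50,
--         'trust_boundary_violation': 45,
--         'csrf': 40,
--         'log_injection': 30,
--     }
--
--     scored_vulns = []
--     for vuln in vulnerabilities:
--         base_score = severity_order.get(vuln, 0)
--         evidence_boost = 0
--
--         if vuln == 'null_pointer_dereference':
--             if 'getProfile().get' in source_code or ').get' in source_code:
--                 evidence_boost = 20
--             elif '.get(' in source_code and '.length()' in source_code:
--                 evidence_boost = 10
--
--         final_score = base_score + evidence_boost
--         scored_vulns.append((vuln, final_score))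
--
--     scored_vulns.sort(key=lambda x: x[1], reverse=True)
--     return scored_vulns[0][0]
-- ===== SOURCE B (Python) =====
-- _SEVERITY_ORDER = {
--     'null_pointer_dereference': 100,
--     'buffer_overflow': 95,
--     'integer_overflow': 92,
--     'sql_injection': 90,
--     'command_injection': 90,
--     'deserialization': 85,
--     'xxe': 85,
--     'ssrf': 84,
--     'el_injection': 83,
--     'http_response_splitting': 82,
--     'reflection_injection': 80,
--     'session_fixation': 78,
--     'resource_leak': 76,
--     'ldap_injection': 75,
--     'xpath_injection': 74,
--     'race_condition': 72,
--     'xss': 70,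
--     'path_traversal': 70,
--     'weak_crypto': 60,
--     'insecure_randomness': 55,
--     'hardcoded_credentials': 50,
--     'trust_boundary_violation': 45,
--     'csrf': 40,
--     'log_injection': 30,
-- }
--
--
-- def _select_primary_vulnerability_by_severity(vulnerabilities, source_code):
--     """Single linear pass: track the best-scoring vulnerability, strict > keeps the first."""
--     if not vulnerabilities:
--         return 'none'
--
--     def score(vuln):
--         s = _SEVERITY_ORDER.get(vuln, 0)
--         if vuln == 'null_pointer_dereference':
--             if 'getProfile().get' in source_code or ').get' in source_code:
--                 s += 20
--             elif '.get(' in source_code and '.length()' in source_code: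
--                 s += 10
--         return s
--
--     best = vulnerabilities[0]
--     best_score = score(best)
--     for v in vulnerabilities[1:]:
--         sc = score(v)
--         if sc > best_score:
--             best, best_score = v, sc
--     return best
-- ===== Notes on version B (the rewrite author's own statement) =====
-- stated objective: simpler
-- what changed: Replaces building a scored list and stably reverse-sorting it with a single linear pass that keeps the first vulnerability of maximal score (strict > update), with the scoring factored into a helper.
import Mathlib
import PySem

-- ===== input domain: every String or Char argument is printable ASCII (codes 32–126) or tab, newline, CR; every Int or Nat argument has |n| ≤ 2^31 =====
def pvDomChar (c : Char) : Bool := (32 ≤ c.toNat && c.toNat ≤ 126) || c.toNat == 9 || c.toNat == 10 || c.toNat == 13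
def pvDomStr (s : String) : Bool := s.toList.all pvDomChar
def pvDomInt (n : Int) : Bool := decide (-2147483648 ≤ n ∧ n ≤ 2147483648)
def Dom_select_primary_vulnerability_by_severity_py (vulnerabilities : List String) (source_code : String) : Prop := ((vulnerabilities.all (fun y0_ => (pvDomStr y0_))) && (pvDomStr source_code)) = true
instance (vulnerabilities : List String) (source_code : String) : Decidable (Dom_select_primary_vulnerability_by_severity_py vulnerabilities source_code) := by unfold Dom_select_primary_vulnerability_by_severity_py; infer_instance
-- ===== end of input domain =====

-- ===== PORT A =====
-- B replaces the scored-list-plus-stable-reverse-sort with one linear pass keeping the first maximal score (objective: simpler).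
def pvSeverityOrder : PySem.Dict String Int := PySem.Dict.ofList [
  ("null_pointer_dereference", 100), ("buffer_overflow", 95), ("integer_overflow", 92),
  ("sql_injection", 90), ("command_injection", 90), ("deserialization", 85), ("xxe", 85),
  ("ssrf", 84), ("el_injection", 83), ("http_response_splitting", 82), ("reflection_injection", 80),
  ("session_fixation", 78), ("resource_leak", 76), ("ldap_injection", 75), ("xpath_injection", 74),
  ("race_condition", 72), ("xss", 70), ("path_traversal", 70), ("weak_crypto", 60),
  ("insecure_randomness", 55), ("hardcoded_credentials", 50), ("trust_boundary_violation", 45),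
  ("csrf", 40), ("log_injection", 30)]

def select_primary_vulnerability_by_severity_py (vulnerabilities : List String) (source_code : String) : String :=
  if vulnerabilities = [] then "none"
  else
    let scored_vulns : List (String × Int) :=
      vulnerabilities.foldl (fun acc vuln =>
        let base_score := pvSeverityOrder.getD vuln 0
        let evidence_boost : Int :=
          if vuln == "null_pointer_dereference" then
            if PySem.Str.isIn "getProfile().get" source_code || PySem.Str.isIn ").get" source_code then 20
            else if PySem.Str.isIn ".get(" source_code && PySem.Str.isIn ".length()" source_code then 10
            else 0
          else 0
        let final_score := base_score + evidence_boost
        acc ++ [(vuln, final_score)]) []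
    match PySem.List.sorted scored_vulns (fun x => x.2) true with
    | [] => "none"  -- unreachable (scored_vulns is nonempty); Python would raise IndexError
    | p :: _ => p.1

-- ===== PORT B =====
def pvScoreB (source_code : String) (vuln : String) : Int :=
  let s := pvSeverityOrder.getD vuln 0
  if vuln == "null_pointer_dereference" then
    if PySem.Str.isIn "getProfile().get" source_code || PySem.Str.isIn ").get" source_code then s + 20
    else if PySem.Str.isIn ".get(" source_code && PySem.Str.isIn ".length()" source_code then s + 10
    else s
  else s

def select_primary_vulnerability_by_severity_py_alt (vulnerabilities : List String) (source_code : String) : String :=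
  match vulnerabilities with
  | [] => "none"
  | v :: rest =>
    (rest.foldl (fun (acc : String × Int) x =>
        let sc := pvScoreB source_code x
        if acc.2 < sc then (x, sc) else acc)
      (v, pvScoreB source_code v)).1

-- ===== PRECONDITION & SPEC =====
def Spec_select_primary_vulnerability_by_severity_py (vulnerabilities : List String) (source_code : String) (out : String) : Prop := out = select_primary_vulnerability_by_severity_py_alt vulnerabilities source_code
instance (vulnerabilities : List String) (source_code : String) (out : String) : Decidable (Spec_select_primary_vulnerability_by_severity_py vulnerabilities source_code out) := by unfold Spec_select_primary_vulnerability_by_severity_py; infer_instance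

-- ===== CLAIM (what is proved, stated in full; the proofs are below) =====
def Claim_equal_select_primary_vulnerability_by_severity_py : Prop := ∀ (vulnerabilities : List String) (source_code : String), Dom_select_primary_vulnerability_by_severity_py vulnerabilities source_code → Spec_select_primary_vulnerability_by_severity_py vulnerabilities source_code (select_primary_vulnerability_by_severity_py vulnerabilities source_code)

-- ===== LEMMAS AND PROOFS =====

-- The head of the insertion fold that realises Python's stable reverse sort is exactly
-- the strict-improvement linear scan (B's loop): each insertBy changes the head iff the
-- new element's key strictly exceeds the current head's key.
theorem pv_head_foldl_insertBy {α : Type} (key : α → Int) :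
    ∀ (rest : List α) (b : α) (t : List α),
      (List.foldl (fun acc x => PySem.List.insertBy (fun a c => decide (key c < key a)) x acc) (b :: t) rest).head?
        = some (List.foldl (fun a x => if key a < key x then x else a) b rest) := by
  intro rest
  induction rest with
  | nil => intro b t; rfl
  | cons x rest ih =>
    intro b t
    simp only [List.foldl_cons, PySem.List.insertBy]
    by_cases h : key b < key x
    · simp only [h, decide_true, if_true]
      exact ih x (b :: t)
    · simp only [h, decide_false, if_false]
      exact ih b _

-- ===== VERDICT (by name: the statement is the Claim_ definition above) =====
theorem select_primary_vulnerability_by_severity_py_spec : Claim_equal_select_primary_vulnerability_by_severity_py := by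
  intro vulnerabilities source_code _
  unfold Spec_select_primary_vulnerability_by_severity_py
  unfold select_primary_vulnerability_by_severity_py select_primary_vulnerability_by_severity_py_alt
  cases vulnerabilities with
  | nil => rfl
  | cons v rest =>
    simp only [if_false, reduceCtorEq]
    -- the scored list is the map of B's scoring function
    rw [show ∀ (l : List String) (acc : List (String × Int)),
          l.foldl (fun acc vuln =>
            let base_score := pvSeverityOrder.getD vuln 0
            let evidence_boost : Int :=
              if vuln == "null_pointer_dereference" then
                if PySem.Str.isIn "getProfile().get" source_code || PySem.Str.isIn ").get" source_code then 20
                else if PySem.Str.isIn ".get(" source_code && PySem.Str.isIn ".length()" source_code then 10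
                else 0
              else 0
            let final_score := base_score + evidence_boost
            acc ++ [(vuln, final_score)]) acc
          = acc ++ l.map (fun vuln => (vuln, pvScoreB source_code vuln)) from ?_ ,
        List.nil_append]
    · rw [PySem.List.sorted_rev_eq_foldl_insertBy]
      simp only [List.map_cons, List.foldl_cons]
      have h := pv_head_foldl_insertBy (fun x : String × Int => x.2)
        (rest.map (fun vuln => (vuln, pvScoreB source_code vuln))) (v, pvScoreB source_code v) []
      simp only [List.foldl_map] at h
      rw [List.foldl_map,
        show PySem.List.insertBy (fun a b => decide (b.2 < a.2)) (v, pvScoreB source_code v)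
            ([] : List (String × Int)) = [(v, pvScoreB source_code v)] from rfl]
      obtain ⟨tl, hE⟩ := List.head?_eq_some_iff.mp h
      rw [hE]
    · intro l
      induction l with
      | nil => intro acc; simp
      | cons y ys ihy =>
        intro acc
        simp only [List.foldl_cons, List.map_cons]
        rw [ihy, List.append_assoc, List.singleton_append]
        have hsc : (pvSeverityOrder.getD y 0 +
            if y == "null_pointer_dereference" then
              if PySem.Str.isIn "getProfile().get" source_code || PySem.Str.isIn ").get" source_code then (20 : Int)
              else if PySem.Str.isIn ".get(" source_code && PySem.Str.isIn ".length()" source_code then 10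
              else 0
            else 0) = pvScoreB source_code y := by
          simp only [pvScoreB]
          split_ifs <;> ring
        rw [hsc]
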